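-- pv_equiv track=rewrite | github.com/Goodoasis/mastermind | api.py | _easy_answer_proposal
-- ===== SOURCE A (Python) =====
-- def _easy_answer_proposal(code:list, proposal:list) -> list[int]:
--     """Compare the proposal with the secret code to return a response.
--
--     Args:
--         code (List): Actual secret code.
--         proposal (List): list of proposal pawn.
--
--     Returns:
--         List: match type(2=perfect match, 1=color match, 0=no) for each proposal pawn.
--     """
--     answer = []
--     matched_index = []
--     # find all perfect matches and keep indexes.
--     for index, pawn in enumerate(proposal):
--         if pawn == code[index]:
--             matched_index.append(index)
--             answer.append(2)
--     # remove pawn already matched.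
--     clean_code = [j for e, j in enumerate(code) if e not in matched_index]
--     for index, pawn in enumerate(proposal):
--         if index in matched_index: # If this pawn has already had match, we skip.
--             continue
--         if pawn in clean_code:
--             answer.insert(index, 1) # partiel match.
--             clean_code.remove(pawn) # To avoid duplicates.
--         else: # If none match the match type is 0.
--             answer.insert(index, 0)
--     return answer
-- ===== SOURCE B (Python) =====
-- def _easy_answer_proposal(code: list, proposal: list) -> list[int]:
--     """Stateless per-pawn scoring: no matched-index bookkeeping and no
--     consumable leftover container.  A pawn scores 2 when it matches in
--     place; otherwise it scores 1 exactly when its rank among earlier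
--     unmatched occurrences of the same color is below the color's leftover
--     supply in the code, else 0."""
--     n = len(proposal)
--
--     def green(i):
--         return i < n and proposal[i] == code[i]
--
--     def score(i):
--         if green(i):
--             return 2
--         p = proposal[i]
--         supply = sum(1 for j in range(len(code)) if code[j] == p and not green(j))
--         rank = sum(1 for j in range(i) if proposal[j] == p and not green(j))
--         return 1 if rank < supply else 0
--
--     return [score(i) for i in range(n)]
-- ===== Notes on version B (the rewrite author's own statement) =====
-- stated objective: alternative
-- what changed: B drops A's stateful greedy machinery (matched-index list, rebuilt clean_code, per-pawn membership test with list.remove and positional insert) and scores each pawn independently by a stateless closed-form criterion: 1 iff the pawn's rank among earlier unmatched same-color pawns is below that color's leftover supply in the code.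
import Mathlib
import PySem

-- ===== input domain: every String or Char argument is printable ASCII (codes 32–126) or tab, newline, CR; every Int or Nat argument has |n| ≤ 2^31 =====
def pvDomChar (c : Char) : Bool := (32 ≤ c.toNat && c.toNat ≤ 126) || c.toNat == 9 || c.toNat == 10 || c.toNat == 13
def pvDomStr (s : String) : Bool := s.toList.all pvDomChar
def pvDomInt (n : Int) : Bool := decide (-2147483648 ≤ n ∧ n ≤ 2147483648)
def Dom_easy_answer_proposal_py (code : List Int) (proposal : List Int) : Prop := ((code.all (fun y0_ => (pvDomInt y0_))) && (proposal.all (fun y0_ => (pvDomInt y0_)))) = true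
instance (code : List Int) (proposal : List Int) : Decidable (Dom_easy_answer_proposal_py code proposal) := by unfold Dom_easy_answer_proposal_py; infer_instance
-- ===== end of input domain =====

-- B replaces A's stateful greedy machinery (matched-index list, rebuilt clean_code,
-- membership test + list.remove + positional insert) by a stateless per-pawn closed
-- form: 1 iff the pawn's rank among earlier unmatched same-color pawns is below the
-- color's leftover supply (objective: alternative).

-- ===== PORT A =====
-- first loop: 'if pawn == code[index]: matched_index.append(index); answer.append(2)'
-- (code[index] raises IndexError when index >= len(code) — excluded by Pre_; '.getD 0' stands in there)
def stepA1 (code : List Int) (st : List Int × List Int) (ip : Int × Int) : List Int × List Int :=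
  if ip.2 = PySem.List.pyGetD code ip.1 0 then (st.1 ++ [ip.1], st.2 ++ [2]) else st

-- second loop: skip matched indexes, 'answer.insert(index, 1); clean_code.remove(pawn)' / 'answer.insert(index, 0)'
-- (list.remove only reached under 'pawn in clean_code', so remove? is some; '.getD st.2' stands for the unreachable none)
def stepA2 (matched : List Int) (st : List Int × List Int) (ip : Int × Int) : List Int × List Int :=
  if matched.contains ip.1 then st
  else if st.2.contains ip.2 then
    (PySem.List.insert st.1 ip.1 1, (PySem.List.remove? st.2 ip.2).getD st.2)
  else (PySem.List.insert st.1 ip.1 0, st.2)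

def easy_answer_proposal_py (code : List Int) (proposal : List Int) : List Int :=
  let fst := (PySem.List.enumerate proposal).foldl (stepA1 code) ([], [])
  -- clean_code = [j for e, j in enumerate(code) if e not in matched_index]
  let clean := ((PySem.List.enumerate code).filter (fun ej => !(fst.1.contains ej.1))).map (·.2)
  ((PySem.List.enumerate proposal).foldl (stepA2 fst.1) (fst.2, clean)).1

-- ===== PORT B =====
-- 'def green(i): return i < n and proposal[i] == code[i]'
def greenB (code : List Int) (proposal : List Int) (i : Nat) : Bool :=
  decide (i < proposal.length) && decide (proposal.getD i 0 = code.getD i 0)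

-- 'def score(i): …'  (proposal[i]/code[i] are in range under Pre_; '.getD 0' stands in)
def scoreB (code : List Int) (proposal : List Int) (i : Nat) : Int :=
  if greenB code proposal i then 2
  else
    let p := proposal.getD i 0
    let supply := (List.range code.length).countP
      (fun j => decide (code.getD j 0 = p) && !greenB code proposal j)
    let rank := (List.range i).countP
      (fun j => decide (proposal.getD j 0 = p) && !greenB code proposal j)
    if rank < supply then 1 else 0

-- 'return [score(i) for i in range(n)]'
def easy_answer_proposal_py_alt (code : List Int) (proposal : List Int) : List Int :=
  (List.range proposal.length).map (scoreB code proposal)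

-- ===== PRECONDITION & SPEC =====
-- Pre_ excludes exactly the inputs where A raises IndexError (code[index] with
-- len(proposal) > len(code)); B raises there too (code[i] inside score/green).
def Pre_easy_answer_proposal_py (code : List Int) (proposal : List Int) : Prop :=
  proposal.length ≤ code.length
instance (code : List Int) (proposal : List Int) : Decidable (Pre_easy_answer_proposal_py code proposal) := by unfold Pre_easy_answer_proposal_py; infer_instance

def pvWitness_easy_answer_proposal_py : List Int × List Int := ([1, 2, 3, 1], [3, 2, 1, 1])

def Spec_easy_answer_proposal_py (code : List Int) (proposal : List Int) (out : List Int) : Prop := out = easy_answer_proposal_py_alt code proposal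
instance (code : List Int) (proposal : List Int) (out : List Int) : Decidable (Spec_easy_answer_proposal_py code proposal out) := by unfold Spec_easy_answer_proposal_py; infer_instance

-- ===== CLAIM (what is proved, stated in full; the proofs are below) =====
def Claim_equal_easy_answer_proposal_py : Prop := ∀ (code : List Int) (proposal : List Int), Dom_easy_answer_proposal_py code proposal → Pre_easy_answer_proposal_py code proposal → Spec_easy_answer_proposal_py code proposal (easy_answer_proposal_py code proposal)

-- ===== LEMMAS AND PROOFS =====

-- 'proposal[j] == code[j]' as a Nat-indexed Bool test
def mb (code proposal : List Int) (j : Nat) : Bool := decide (proposal.getD j 0 = code.getD j 0)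

-- the perfectly-matched indexes below t
def mlist (code proposal : List Int) (t : Nat) : List Nat := (List.range t).filter (mb code proposal)

-- the matched indexes as Python ints
def natsToInts (l : List Nat) : List Int := l.map Int.ofNat

-- the leftover (non-perfectly-matched) code values below t
def cvals (code proposal : List Int) (t : Nat) : List Int :=
  ((List.range t).filter (fun e => !(decide (e < proposal.length) && mb code proposal e))).map
    (fun e => code.getD e 0)

-- leftover supply of color v in the code
def supplyN (code proposal : List Int) (v : Int) : Nat :=
  (List.range code.length).countP (fun j => decide (code.getD j 0 = v) && !greenB code proposal j)

-- number of unmatched occurrences of color v among proposal positions below s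
def rankN (code proposal : List Int) (s : Nat) (v : Int) : Nat :=
  (List.range s).countP (fun j => decide (proposal.getD j 0 = v) && !greenB code proposal j)

-- number of perfect matches among positions [s, s+t)
def gcnt (code proposal : List Int) (s t : Nat) : Nat :=
  (List.range' s t).countP (greenB code proposal)

-- a fold over enumerate(xs) is a fold over range(len(xs)) feeding (j, xs[j])
theorem foldl_enumerate_eq_range {α σ : Type} (xs : List α) (d : α) (f : σ → Int × α → σ)
    (init : σ) :
    (PySem.List.enumerate xs).foldl f init
      = (List.range xs.length).foldl (fun st (j : Nat) => f st ((j : Int), xs.getD j d)) init := by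
  rw [PySem.List.enumerate_eq_map_pyRange xs d]
  simp only [PySem.List.len_eq, PySem.List.pyRange_zero_natCast, List.map_map, List.foldl_map,
    Function.comp_def, PySem.List.pyGetD_natCast]

-- characterization of A's first loop
theorem A1_char (code proposal : List Int) (t : Nat) :
    (List.range t).foldl (fun st (j : Nat) => stepA1 code st ((j : Int), proposal.getD j 0)) ([], [])
      = (natsToInts (mlist code proposal t),
         List.replicate (mlist code proposal t).length 2) := by
  induction t with
  | zero => rfl
  | succ t ih =>
      rw [List.range_succ, List.foldl_append, ih]
      simp only [List.foldl_cons, List.foldl_nil, stepA1, PySem.List.pyGetD_natCast]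
      by_cases h : mb code proposal t
      · have h' : proposal[t]?.getD 0 = code[t]?.getD 0 := by
          have hh : proposal.getD t 0 = code.getD t 0 := by simpa [mb] using h
          simpa [List.getD_eq_getElem?_getD] using hh
        simp [natsToInts, mlist, List.range_succ, List.filter_append, h, h',
          List.replicate_succ']
      · have h' : ¬ proposal[t]?.getD 0 = code[t]?.getD 0 := by
          have hh : ¬ proposal.getD t 0 = code.getD t 0 := by simpa [mb] using h
          simpa [List.getD_eq_getElem?_getD] using hh
        simp [natsToInts, mlist, List.range_succ, List.filter_append, h, h']

-- membership of a Nat index in the matched-index list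
theorem contains_matched (code proposal : List Int) (t : Nat) :
    (natsToInts (mlist code proposal proposal.length)).contains ((t : Nat) : Int)
      = (decide (t < proposal.length) && mb code proposal t) := by
  by_cases h1 : t < proposal.length
  · by_cases h2 : mb code proposal t
    · have hmemt : ((t : Nat) : Int) ∈ natsToInts (mlist code proposal proposal.length) := by
        simp only [natsToInts, mlist, List.mem_map, List.mem_filter, List.mem_range]
        exact ⟨t, ⟨h1, h2⟩, by simp⟩
      simp [List.contains_eq_mem, hmemt, h1, h2]
    · have hnot : ((t : Nat) : Int) ∉ natsToInts (mlist code proposal proposal.length) := by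
        simp only [natsToInts, mlist, List.mem_map, List.mem_filter, List.mem_range, not_exists]
        rintro a ⟨⟨_, ha2⟩, hae⟩
        have : a = t := by simpa using hae
        subst this
        exact h2 ha2
      simp [List.contains_eq_mem, hnot, h1, h2]
  · have hnot : ((t : Nat) : Int) ∉ natsToInts (mlist code proposal proposal.length) := by
      simp only [natsToInts, mlist, List.mem_map, List.mem_filter, List.mem_range, not_exists]
      rintro a ⟨⟨ha1, _⟩, hae⟩
      have : a = t := by simpa using hae
      subst this
      exact h1 ha1
    simp [List.contains_eq_mem, hnot, h1]

-- A's clean_code list, over range(t), equals the cvals list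
theorem clean_aux (code proposal : List Int) (t : Nat) :
    (((List.range t).map (fun k : Nat => ((k : Int), PySem.List.pyGetD code (k : Int) 0))).filter
        (fun ej =>
          !((natsToInts (mlist code proposal proposal.length)).contains ej.1))).map
      (·.2) = cvals code proposal t := by
  induction t with
  | zero => rfl
  | succ t ih =>
      rw [List.range_succ, List.map_append, List.filter_append, List.map_append, ih]
      simp only [cvals, List.range_succ, List.filter_append, List.map_append]
      congr 1
      simp only [List.map_cons, List.map_nil, List.filter_singleton, contains_matched,
        PySem.List.pyGetD_natCast]
      by_cases h : (decide (t < proposal.length) && mb code proposal t) = true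
      · simp [h]
      · rw [show (decide (t < proposal.length) && mb code proposal t) = false by simpa using h]
        simp

-- A's clean_code equals the cvals list
theorem clean_char (code proposal : List Int) :
    ((PySem.List.enumerate code).filter
        (fun ej =>
          !((natsToInts (mlist code proposal proposal.length)).contains ej.1))).map
      (·.2) = cvals code proposal code.length := by
  rw [PySem.List.enumerate_eq_map_pyRange code 0]
  simp only [PySem.List.len_eq, PySem.List.pyRange_zero_natCast, List.map_map, Function.comp_def]
  exact clean_aux code proposal code.length

-- scoreB written with the proof-side abbreviations
theorem scoreB_eq (code proposal : List Int) (i : Nat) :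
    scoreB code proposal i
      = if greenB code proposal i then 2
        else if rankN code proposal i (proposal.getD i 0)
              < supplyN code proposal (proposal.getD i 0) then 1 else 0 := by
  simp [scoreB, supplyN, rankN]

theorem rankN_succ (code proposal : List Int) (s : Nat) (v : Int) :
    rankN code proposal (s + 1) v
      = rankN code proposal s v
        + (if decide (proposal.getD s 0 = v) && !greenB code proposal s then 1 else 0) := by
  unfold rankN
  rw [List.range_succ, List.countP_append]
  simp [List.countP_cons]

theorem gcnt_succ (code proposal : List Int) (s t : Nat) :
    gcnt code proposal s (t + 1)
      = (if greenB code proposal s then 1 else 0) + gcnt code proposal (s + 1) t := by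
  unfold gcnt
  rw [List.range'_succ, List.countP_cons]
  by_cases h : greenB code proposal s
  · simp [h]
    omega
  · simp [h]

-- the initial clean_code counts each color exactly its leftover supply
theorem count_cvals (code proposal : List Int) (v : Int) :
    (cvals code proposal code.length).count v = supplyN code proposal v := by
  unfold cvals supplyN
  rw [List.count_eq_countP, List.countP_map, List.countP_filter]
  apply List.countP_congr
  intro j _
  simp only [Function.comp, greenB, mb]
  by_cases hv : code.getD j 0 = v
  · simp [hv]
  · simp [hv]

-- the green count over all positions is the matched-index count
theorem gcnt_full (code proposal : List Int) :
    (mlist code proposal proposal.length).length = gcnt code proposal 0 proposal.length := by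
  unfold mlist gcnt
  rw [← List.range_eq_range', ← List.countP_eq_length_filter]
  apply List.countP_congr
  intro j hj
  have : j < proposal.length := List.mem_range.mp hj
  simp [greenB, mb, this]

-- the second-loop lemma: A's greedy pass realizes B's rank-vs-supply closed form
theorem loop2 (code proposal : List Int) :
    ∀ (t s : Nat) (acc cleanA : List Int),
      acc.length = s → s + t ≤ proposal.length →
      (∀ v, cleanA.count v = supplyN code proposal v - rankN code proposal s v) →
      ((List.range' s t).foldl
          (fun st (j : Nat) =>
            stepA2 (natsToInts (mlist code proposal proposal.length)) st
              ((j : Int), proposal.getD j 0))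
          (acc ++ List.replicate (gcnt code proposal s t) 2, cleanA)).1
        = acc ++ (List.range' s t).map (scoreB code proposal) := by
  intro t
  induction t with
  | zero => intro s acc cleanA _ _ _; simp [gcnt]
  | succ t ih =>
      intro s acc cleanA hlen hb hcnt
      have hs : s < proposal.length := by omega
      have hgm : (decide (s < proposal.length) && mb code proposal s)
          = greenB code proposal s := rfl
      rw [List.range'_succ, List.foldl_cons, List.map_cons, gcnt_succ]
      by_cases hg : greenB code proposal s = true
      · -- perfect match: A skips the index (a prebuilt 2 sits there), B scores 2
        rw [if_pos hg]
        have hstep : stepA2 (natsToInts (mlist code proposal proposal.length))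
            (acc ++ List.replicate (1 + gcnt code proposal (s + 1) t) 2, cleanA)
            (((s : Nat) : Int), proposal.getD s 0)
            = (acc ++ List.replicate (1 + gcnt code proposal (s + 1) t) 2, cleanA) := by
          have hcont : (natsToInts (mlist code proposal proposal.length)).contains
              ((s : Nat) : Int) = true := by rw [contains_matched, hgm]; exact hg
          simp only [stepA2, hcont]
          simp
        rw [hstep]
        have hrep : acc ++ List.replicate (1 + gcnt code proposal (s + 1) t) 2
            = (acc ++ [2]) ++ List.replicate (gcnt code proposal (s + 1) t) 2 := by
          rw [Nat.add_comm, List.replicate_succ]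
          simp
        have hscore : scoreB code proposal s = 2 := by rw [scoreB_eq, if_pos hg]
        have hshift : acc ++ (2 : Int) :: (List.range' (s + 1) t).map (scoreB code proposal)
            = (acc ++ [2]) ++ (List.range' (s + 1) t).map (scoreB code proposal) := by
          simp
        rw [hrep, hscore, hshift]
        apply ih (s + 1) (acc ++ [2]) cleanA (by simp [hlen]) (by omega)
        intro v
        rw [hcnt v, rankN_succ]
        simp [hg]
      · -- no perfect match: greedy color-match step realizes 'rank < supply'
        have hgf : greenB code proposal s = false := by simpa using hg
        rw [if_neg hg, Nat.zero_add]
        have hscore : scoreB code proposal s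
            = if rankN code proposal s (proposal.getD s 0)
                < supplyN code proposal (proposal.getD s 0) then 1 else 0 := by
          rw [scoreB_eq, if_neg hg]
        have hins : ∀ v : Int,
            PySem.List.insert
                (acc ++ List.replicate (gcnt code proposal (s + 1) t) 2) ((s : Nat) : Int) v
              = (acc ++ [v]) ++ List.replicate (gcnt code proposal (s + 1) t) 2 := by
          intro v
          rw [PySem.List.insert_natCast _ s v (by simp [hlen])]
          rw [← hlen, List.take_left, List.drop_left, List.append_assoc]
          rfl
        by_cases hx : proposal.getD s 0 ∈ cleanA
        · -- color match: supply still exceeds the rank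
          have hpos : 0 < cleanA.count (proposal.getD s 0) := List.count_pos_iff.mpr hx
          have hlt : rankN code proposal s (proposal.getD s 0)
              < supplyN code proposal (proposal.getD s 0) := by
            have := hcnt (proposal.getD s 0); omega
          have hstep : stepA2 (natsToInts (mlist code proposal proposal.length))
              (acc ++ List.replicate (gcnt code proposal (s + 1) t) 2, cleanA)
              (((s : Nat) : Int), proposal.getD s 0)
              = ((acc ++ [1]) ++ List.replicate (gcnt code proposal (s + 1) t) 2,
                 cleanA.erase (proposal.getD s 0)) := by
            have hcont : (natsToInts (mlist code proposal proposal.length)).contains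
                ((s : Nat) : Int) = false := by rw [contains_matched, hgm]; exact hgf
            have hmem : cleanA.contains (proposal.getD s 0) = true := by
              rw [List.contains_eq_mem, decide_eq_true hx]
            simp only [stepA2, hcont, Bool.false_eq_true, if_false, hmem, hins,
              PySem.List.remove?_eq_some_erase cleanA _ hx, Option.getD_some]
            simp
          rw [hstep, hscore, if_pos hlt]
          have hshift : acc ++ (1 : Int) :: (List.range' (s + 1) t).map (scoreB code proposal)
              = (acc ++ [1]) ++ (List.range' (s + 1) t).map (scoreB code proposal) := by simp
          rw [hshift]
          apply ih (s + 1) (acc ++ [1]) (cleanA.erase (proposal.getD s 0))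
            (by simp [hlen]) (by omega)
          intro v
          rw [rankN_succ]
          rcases eq_or_ne v (proposal.getD s 0) with hv | hv
          · subst hv
            rw [List.count_erase_self, hcnt (proposal.getD s 0)]
            rw [show (decide (proposal.getD s 0 = proposal.getD s 0)
                && !greenB code proposal s) = true by simp [hgf]]
            simp only [if_true]
            omega
          · rw [List.count_erase_of_ne hv, hcnt v]
            rw [show (decide (proposal.getD s 0 = v) && !greenB code proposal s) = false by
              rw [decide_eq_false (fun h => hv h.symm)]; rfl]
            simp
        · -- no match: the supply is exhausted at this rank
          have hzero : cleanA.count (proposal.getD s 0) = 0 :=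
            List.count_eq_zero_of_not_mem hx
          have hge : ¬ rankN code proposal s (proposal.getD s 0)
              < supplyN code proposal (proposal.getD s 0) := by
            have := hcnt (proposal.getD s 0); omega
          have hstep : stepA2 (natsToInts (mlist code proposal proposal.length))
              (acc ++ List.replicate (gcnt code proposal (s + 1) t) 2, cleanA)
              (((s : Nat) : Int), proposal.getD s 0)
              = ((acc ++ [0]) ++ List.replicate (gcnt code proposal (s + 1) t) 2, cleanA) := by
            have hcont : (natsToInts (mlist code proposal proposal.length)).contains
                ((s : Nat) : Int) = false := by rw [contains_matched, hgm]; exact hgf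
            have hmem : cleanA.contains (proposal.getD s 0) = false := by
              rw [List.contains_eq_mem, decide_eq_false hx]
            simp only [stepA2, hcont, Bool.false_eq_true, if_false, hmem, hins]
          rw [hstep, hscore, if_neg hge]
          have hshift : acc ++ (0 : Int) :: (List.range' (s + 1) t).map (scoreB code proposal)
              = (acc ++ [0]) ++ (List.range' (s + 1) t).map (scoreB code proposal) := by simp
          rw [hshift]
          apply ih (s + 1) (acc ++ [0]) cleanA (by simp [hlen]) (by omega)
          intro v
          rw [rankN_succ, hcnt v]
          rcases eq_or_ne v (proposal.getD s 0) with hv | hv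
          · subst hv
            rw [show (decide (proposal.getD s 0 = proposal.getD s 0)
                && !greenB code proposal s) = true by simp [hgf]]
            simp only [if_true]
            omega
          · rw [show (decide (proposal.getD s 0 = v) && !greenB code proposal s) = false by
              rw [decide_eq_false (fun h => hv h.symm)]; rfl]
            simp

-- ===== VERDICT (by name: the statement is the Claim_ definition above) =====
theorem easy_answer_proposal_py_spec : Claim_equal_easy_answer_proposal_py := by
  intro code proposal _ hpre
  unfold Pre_easy_answer_proposal_py at hpre
  unfold Spec_easy_answer_proposal_py
  simp only [easy_answer_proposal_py, easy_answer_proposal_py_alt]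
  rw [foldl_enumerate_eq_range proposal 0 (stepA1 code), A1_char,
      foldl_enumerate_eq_range proposal 0
        (stepA2 (natsToInts (mlist code proposal proposal.length)))]
  rw [clean_char, gcnt_full, List.range_eq_range']
  have hmain := loop2 code proposal proposal.length 0 [] (cvals code proposal code.length)
    rfl (by omega)
    (by intro v; rw [count_cvals]; simp [rankN])
  simpa using hmain
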